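-- pv_equiv track=rewrite | github.com/facebookresearch/TextVQA | backend/scripts/feed_es.py | get_max_answer
-- ===== SOURCE A (Python) =====
-- from collections import Counter
--
-- def get_max_answer(answers):
--     processed_answers = []
--
--     for answer in answers:
--         processed_answers.append(answer.strip().lower())
--
--     answer_counter = Counter(processed_answers)
--     other_answers = ["unanswerable", "no text in image",
--                       "answering does not require reading text in the image", "not a question"]
--     for item, _ in answer_counter.most_common():
--         if item not in other_answers:
--             return item
-- ===== SOURCE B (Python) =====
-- from collections import Counter
--
-- def get_max_answer(answers):
--     counts = Counter(a.strip().lower() for a in answers)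
--     excluded = {"unanswerable", "no text in image",
--                 "answering does not require reading text in the image", "not a question"}
--     candidates = [a for a in counts if a not in excluded]
--     if not candidates:
--         return None
--     return max(candidates, key=counts.__getitem__)
-- ===== Notes on version B (the rewrite author's own statement) =====
-- stated objective: simpler
-- what changed: B drops most_common()'s full sort plus exclusion skip-loop and instead filters the Counter's keys by the excluded set and takes a single linear first-extremal max over the candidates (ties resolve to first insertion, matching the stable sort).
import Mathlib
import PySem

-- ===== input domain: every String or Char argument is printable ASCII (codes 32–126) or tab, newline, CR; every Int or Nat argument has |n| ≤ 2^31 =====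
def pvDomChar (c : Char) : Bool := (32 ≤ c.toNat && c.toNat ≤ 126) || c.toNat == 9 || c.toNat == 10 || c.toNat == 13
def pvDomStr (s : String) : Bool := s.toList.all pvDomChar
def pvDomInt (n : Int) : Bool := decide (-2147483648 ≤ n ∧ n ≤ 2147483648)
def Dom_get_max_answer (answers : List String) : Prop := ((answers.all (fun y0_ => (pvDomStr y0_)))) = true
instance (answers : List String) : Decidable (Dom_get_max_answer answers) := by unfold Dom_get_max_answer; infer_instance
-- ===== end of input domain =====

-- B replaces A's most_common() sort + skip-loop by a filter of the Counter's keys and one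
-- linear first-extremal max scan (no sort); same return value everywhere.

-- ===== PORT A =====
def otherAnswers_pv : List String :=
  ["unanswerable", "no text in image",
   "answering does not require reading text in the image", "not a question"]

-- the 'for item, _ in …: if item not in other_answers: return item' loop (falls off the end = None)
def pickA (other : List String) : List (String × Int) → Option String
  | [] => none
  | (item, _) :: rest => if other.contains item then pickA other rest else some item

def get_max_answer (answers : List String) : Option String :=
  let processed_answers := answers.foldl (fun acc answer => acc ++ [PySem.Str.lower (PySem.Str.strip answer)]) []
  let answer_counter := PySem.Dict.counter processed_answers
  pickA otherAnswers_pv (PySem.List.sorted answer_counter.items (fun p => p.2) true)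

-- ===== PORT B =====
def get_max_answer_alt (answers : List String) : Option String :=
  let counts := PySem.Dict.counter (answers.map (fun a => PySem.Str.lower (PySem.Str.strip a)))
  let excluded := PySem.Set.ofList
    ["unanswerable", "no text in image",
     "answering does not require reading text in the image", "not a question"]
  let candidates := counts.keys.filter (fun a => !(excluded.contains a))
  match candidates with
  | [] => none
  | _ :: _ => PySem.List.max? candidates (fun a => counts.getD a 0)

-- ===== PRECONDITION & SPEC =====
def Spec_get_max_answer (answers : List String) (out : Option String) : Prop := out = get_max_answer_alt answers
instance (answers : List String) (out : Option String) : Decidable (Spec_get_max_answer answers out) := by unfold Spec_get_max_answer; infer_instance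

-- ===== CLAIM (what is proved, stated in full; the proofs are below) =====
def Claim_equal_get_max_answer : Prop := ∀ (answers : List String), Dom_get_max_answer answers → Spec_get_max_answer answers (get_max_answer answers)

-- ===== LEMMAS AND PROOFS =====
-- equation lemmas for the hand-written scan and for insertBy
lemma pickA_nil (other : List String) : pickA other [] = none := rfl

lemma pickA_cons (other : List String) (y : String × Int) (t : List (String × Int)) :
    pickA other (y :: t) = if other.contains y.1 then pickA other t else some y.1 := by
  obtain ⟨y1, y2⟩ := y; rfl

lemma insertBy_cons {α : Type} (before : α → α → Bool) (x y : α) (ys : List α) :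
    PySem.List.insertBy before x (y :: ys) =
      if before x y then x :: y :: ys else y :: PySem.List.insertBy before x ys := rfl

-- the running-max step and loop that B's max? performs (proof-side reformulation of PySem.List.max?)
def maxStep (c : String → Int) (acc : Option String) (x : String) : Option String :=
  match acc with
  | none => some x
  | some m => if c m < c x then some x else some m

def runMax (c : String → Int) (l : List String) : Option String :=
  l.foldl (maxStep c) none

lemma runMax_eq_max? (c : String → Int) (l : List String) :
    runMax c l = PySem.List.max? l c := by
  unfold runMax PySem.List.max?
  congr 1
  funext acc x
  cases acc <;> rfl

lemma runMax_append_singleton (c : String → Int) (l : List String) (x : String) :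
    runMax c (l ++ [x]) = maxStep c (runMax c l) x := by
  unfold runMax
  rw [List.foldl_append, List.foldl_cons, List.foldl_nil]

-- if pickA returns a name, that name heads some pair of the list that is not excluded
lemma pickA_some_mem (other : List String) (s : List (String × Int)) (m : String)
    (h : pickA other s = some m) : ∃ p ∈ s, p.1 = m ∧ other.contains p.1 = false := by
  induction s with
  | nil => simp [pickA] at h
  | cons y t ih =>
    rw [pickA_cons] at h
    by_cases hc : other.contains y.1 = true
    · rw [if_pos hc] at h
      obtain ⟨p, hp, h1, h2⟩ := ih h
      exact ⟨p, List.mem_cons_of_mem _ hp, h1, h2⟩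
    · rw [if_neg hc] at h
      exact ⟨y, List.mem_cons_self, Option.some.inj h, Bool.not_eq_true _ ▸ hc⟩

-- one stable descending insertion, seen through A's scan: it behaves as one step of B's running max
lemma pickA_insertBy (other : List String) (c : String → Int) (x : String × Int)
    (hx : x.2 = c x.1) (s : List (String × Int))
    (hpair : s.Pairwise (fun a b => b.2 ≤ a.2))
    (hmem : ∀ p ∈ s, p.2 = c p.1) :
    pickA other (PySem.List.insertBy (fun a b => decide (b.2 < a.2)) x s) =
      if other.contains x.1 then pickA other s
      else maxStep c (pickA other s) x.1 := by
  induction s with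
  | nil =>
    rw [show PySem.List.insertBy (fun a b => decide (b.2 < a.2)) x [] = [x] from rfl,
      pickA_cons, pickA_nil]
    rfl
  | cons y t ih =>
    rw [insertBy_cons]
    by_cases hlt : y.2 < x.2
    · rw [if_pos (decide_eq_true hlt), pickA_cons]
      by_cases hq : other.contains x.1 = true
      · rw [if_pos hq, if_pos hq]
      · rw [if_neg hq, if_neg hq]
        cases hp : pickA other (y :: t) with
        | none => rfl
        | some m =>
          obtain ⟨p, hpmem, hp1, -⟩ := pickA_some_mem other _ _ hp
          have hple : p.2 ≤ y.2 := by
            rcases List.mem_cons.mp hpmem with h | h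
            · rw [h]
            · exact (List.pairwise_cons.mp hpair).1 p h
          have hcm : c m < c x.1 := by
            have hpc := hmem p hpmem
            rw [← hp1, ← hpc, ← hx]; omega
          rw [show maxStep c (some m) x.1 = if c m < c x.1 then some x.1 else some m from rfl,
            if_pos hcm]
    · rw [if_neg (by simpa using hlt), pickA_cons, pickA_cons]
      have hpt : t.Pairwise (fun a b => b.2 ≤ a.2) := (List.pairwise_cons.mp hpair).2
      have hmt : ∀ p ∈ t, p.2 = c p.1 := fun p hp => hmem p (List.mem_cons_of_mem _ hp)
      by_cases hqy : other.contains y.1 = true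
      · rw [if_pos hqy, if_pos hqy, ih hpt hmt]
      · rw [if_neg hqy, if_neg hqy]
        by_cases hq : other.contains x.1 = true
        · rw [if_pos hq]
        · rw [if_neg hq]
          have hy2 : y.2 = c y.1 := hmem y List.mem_cons_self
          have hnlt : ¬ c y.1 < c x.1 := by rw [← hy2, ← hx]; omega
          rw [show maxStep c (some y.1) x.1 = if c y.1 < c x.1 then some x.1 else some y.1 from rfl,
            if_neg hnlt]

-- main bridge: A's scan of the stable reverse sort of (k, c k) pairs IS B's max? over the filtered keys
lemma pickA_sorted_eq_max? (other : List String) (c : String → Int) (ks : List String) :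
    pickA other (PySem.List.sorted (ks.map (fun k => (k, c k))) (fun p => p.2) true) =
      runMax c (ks.filter (fun a => !(other.contains a))) := by
  induction ks using List.reverseRecOn with
  | nil => rfl
  | append_singleton ks k ih =>
    have hsplit : PySem.List.sorted ((ks ++ [k]).map (fun k => (k, c k))) (fun p => p.2) true =
        PySem.List.insertBy (fun a b => decide (b.2 < a.2)) (k, c k)
          (PySem.List.sorted (ks.map (fun k => (k, c k))) (fun p => p.2) true) := by
      rw [PySem.List.sorted_rev_eq_foldl_insertBy, PySem.List.sorted_rev_eq_foldl_insertBy,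
        List.map_append, List.map_singleton, List.foldl_append]
      rfl
    rw [hsplit,
      pickA_insertBy other c (k, c k) rfl _
        (PySem.List.sorted_pairwise_rev _ _)
        (fun p hp => by
          obtain ⟨k', _, hk'⟩ := List.mem_map.mp ((PySem.List.mem_sorted _ _ _ _).mp hp)
          rw [← hk']),
      ih, List.filter_append]
    by_cases hq : other.contains k = true
    · rw [if_pos (show other.contains (k, c k).1 = true from hq)]
      have h1 : List.filter (fun a => !(other.contains a)) [k] = [] := by
        rw [List.filter_cons, hq]; rfl
      rw [h1, List.append_nil]
    · rw [if_neg (show ¬ other.contains (k, c k).1 = true from hq)]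
      have hqf : other.contains k = false := by revert hq; cases other.contains k <;> simp
      have h1 : List.filter (fun a => !(other.contains a)) [k] = [k] := by
        rw [List.filter_cons, hqf]; rfl
      rw [h1, runMax_append_singleton]

-- B's match-on-candidates is just max? (max? of the empty list is none)
lemma match_max? (l : List String) (c : String → Int) :
    (match l with | [] => none | _ :: _ => PySem.List.max? l c) = PySem.List.max? l c := by
  cases l with
  | nil => rfl
  | cons y t => rfl

lemma alt_eq_max? (answers : List String) :
    get_max_answer_alt answers =
      PySem.List.max?
        ((PySem.Dict.counter (answers.map (fun a => PySem.Str.lower (PySem.Str.strip a)))).keys.filter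
          (fun a => !((PySem.Set.ofList otherAnswers_pv).contains a)))
        (fun a => (PySem.Dict.counter (answers.map (fun a => PySem.Str.lower (PySem.Str.strip a)))).getD a 0) := by
  unfold get_max_answer_alt otherAnswers_pv
  exact match_max? _ _

-- ===== VERDICT (by name: the statement is the Claim_ definition above) =====
theorem get_max_answer_spec : Claim_equal_get_max_answer := by
  intro answers _
  unfold Spec_get_max_answer
  rw [alt_eq_max?]
  unfold get_max_answer
  simp only [PySem.List.foldl_append_singleton_eq_map, List.nil_append]
  set processed := answers.map (fun a => PySem.Str.lower (PySem.Str.strip a)) with hproc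
  rw [PySem.Dict.items_counter, PySem.Dict.keys_counter]
  have hset : (PySem.Set.ofList otherAnswers_pv) = otherAnswers_pv := by decide
  have hfun : (fun a => (PySem.Dict.counter processed).getD a 0) =
      (fun a => ((List.count a processed : Nat) : Int)) := by
    funext a; exact PySem.Dict.getD_counter processed a
  rw [hset, hfun, ← runMax_eq_max?]
  exact pickA_sorted_eq_max? otherAnswers_pv (fun k => ((List.count k processed : Nat) : Int)) _
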